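-- pv_equiv track=rewrite | github.com/xinmo/DEEPCLAW | javisagent/backend/src/routes/claw/chat.py | _derive_planning_status
-- ===== SOURCE A (Python) =====
-- from typing import Any
--
-- def _derive_planning_status(todos: list[dict[str, Any]]) -> str:
--     if not todos:
--         return "pending"
--
--     statuses = {str(item.get("status", "pending")) for item in todos if isinstance(item, dict)}
--     if "in_progress" in statuses:
--         return "in_progress"
--     if statuses and statuses <= {"completed"}:
--         return "completed"
--     return "pending"
-- ===== SOURCE B (Python) =====
-- def _derive_planning_status(todos: list) -> str:
--     # early-exit state machine: return at the first "in_progress"; at the first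
--     # other non-completed status only "in_progress" can still change the verdict
--     seen_completed = False
--     for idx, item in enumerate(todos):
--         if not isinstance(item, dict):
--             continue
--         s = str(item.get("status", "pending"))
--         if s == "in_progress":
--             return "in_progress"
--         if s != "completed":
--             return _scan_pending(todos[idx + 1:])
--         seen_completed = True
--     return "completed" if seen_completed else "pending"
--
-- def _scan_pending(rest):
--     for item in rest:
--         if isinstance(item, dict) and str(item.get("status", "pending")) == "in_progress":
--             return "in_progress"
--     return "pending"
-- ===== Notes on version B (the rewrite author's own statement) =====
-- stated objective: alternative
-- what changed: Replaces A's build-a-set-then-test-membership/subset scheme with a short-circuiting recursive state machine that returns at the first 'in_progress' and degrades to a pending-only scan at the first other non-completed status, never materialising the set of statuses.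
import Mathlib
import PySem

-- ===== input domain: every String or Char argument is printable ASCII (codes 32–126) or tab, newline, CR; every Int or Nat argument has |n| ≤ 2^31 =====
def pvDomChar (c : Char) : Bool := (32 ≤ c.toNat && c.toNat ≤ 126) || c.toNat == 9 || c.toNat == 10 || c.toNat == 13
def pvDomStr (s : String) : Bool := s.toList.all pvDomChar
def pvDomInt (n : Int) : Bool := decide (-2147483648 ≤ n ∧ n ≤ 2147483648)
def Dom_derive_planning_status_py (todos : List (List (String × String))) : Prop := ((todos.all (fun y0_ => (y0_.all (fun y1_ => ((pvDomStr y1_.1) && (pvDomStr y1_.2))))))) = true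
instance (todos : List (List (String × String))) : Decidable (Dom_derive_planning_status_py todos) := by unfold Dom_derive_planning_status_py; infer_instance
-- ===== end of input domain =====

-- B replaces A's set-comprehension + membership/subset tests with a short-circuiting recursive state machine (early return on 'in_progress', degrade to a pending-only scan on any other non-completed status); same O(n) cost, no set built.


-- ===== PORT A =====
-- item.get("status", "pending"); str() is the identity on these string values, and every item is a dict under the type convention
def pvStatusOf (item : List (String × String)) : String :=
  (PySem.Dict.mk item).getD "status" "pending"

def derive_planning_status_py (todos : List (List (String × String))) : String :=
  if todos = [] then "pending"
  else
    let statuses : PySem.Set String := PySem.Set.ofList (todos.map pvStatusOf)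
    if PySem.Set.contains statuses "in_progress" then "in_progress"
    else if statuses ≠ [] ∧ PySem.Set.issubset statuses ["completed"] then "completed"
    else "pending"

-- ===== PORT B =====
-- _scan_pending: only "in_progress" can still change the verdict
def pvScanPending (rest : List (List (String × String))) : String :=
  match rest with
  | [] => "pending"
  | item :: tail =>
      if pvStatusOf item = "in_progress" then "in_progress"
      else pvScanPending tail

-- B's main loop (early return = recursion base), carrying seen_completed; tail stands for todos[idx+1:]
def pvScan (rest : List (List (String × String))) (seen_completed : Bool) : String :=
  match rest with
  | [] => if seen_completed then "completed" else "pending"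
  | item :: tail =>
      let s := pvStatusOf item
      if s = "in_progress" then "in_progress"
      else if s ≠ "completed" then pvScanPending tail
      else pvScan tail true

def derive_planning_status_py_alt (todos : List (List (String × String))) : String :=
  pvScan todos false

-- ===== PRECONDITION & SPEC =====
def Spec_derive_planning_status_py (todos : List (List (String × String))) (out : String) : Prop := out = derive_planning_status_py_alt todos
instance (todos : List (List (String × String))) (out : String) : Decidable (Spec_derive_planning_status_py todos out) := by unfold Spec_derive_planning_status_py; infer_instance

-- ===== CLAIM (what is proved, stated in full; the proofs are below) =====
def Claim_equal_derive_planning_status_py : Prop := ∀ (todos : List (List (String × String))), Dom_derive_planning_status_py todos → Spec_derive_planning_status_py todos (derive_planning_status_py todos)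

-- ===== LEMMAS AND PROOFS =====

lemma pvScanPending_eq (rest : List (List (String × String))) :
    pvScanPending rest =
      if rest.any (fun i => pvStatusOf i = "in_progress") then "in_progress" else "pending" := by
  induction rest with
  | nil => simp [pvScanPending]
  | cons x xs ih =>
      by_cases hx : pvStatusOf x = "in_progress"
      · simp [pvScanPending, hx]
      · simp [pvScanPending, hx, ih]

lemma pvScan_eq (rest : List (List (String × String))) (v : Bool) :
    pvScan rest v =
      if rest.any (fun i => pvStatusOf i = "in_progress") then "in_progress"
      else if rest.all (fun i => pvStatusOf i = "completed") then
        (if rest = [] then (if v then "completed" else "pending") else "completed")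
      else "pending" := by
  induction rest generalizing v with
  | nil => simp [pvScan]
  | cons x xs ih =>
      by_cases hip : pvStatusOf x = "in_progress"
      · simp [pvScan, hip]
      · by_cases hc : pvStatusOf x = "completed"
        · simp only [pvScan, hip, hc, if_false, ite_false, ne_eq, not_true_eq_false, reduceIte]
          rw [ih]
          by_cases ha : xs.any (fun i => pvStatusOf i = "in_progress")
          · simp [ha, hip]
          · by_cases hall : xs.all (fun i => pvStatusOf i = "completed")
            · cases xs with
              | nil => simp [ha, hall, hip, hc]
              | cons y ys => simp [ha, hall, hip, hc]
            · simp [ha, hall, hip, hc]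
        · simp only [pvScan, hip, ite_false, ne_eq, hc, not_false_eq_true, if_pos]
          rw [pvScanPending_eq]
          by_cases ha : xs.any (fun i => pvStatusOf i = "in_progress")
          · simp [ha, hip]
          · simp [ha, hip, hc]

-- ===== VERDICT (by name: the statement is the Claim_ definition above) =====
theorem derive_planning_status_py_spec : Claim_equal_derive_planning_status_py := by
  intro todos _
  unfold Spec_derive_planning_status_py derive_planning_status_py derive_planning_status_py_alt
  by_cases h : todos = []
  · simp [h, pvScan]
  · rw [if_neg h, pvScan_eq]
    have hcont : PySem.Set.contains (PySem.Set.ofList (todos.map pvStatusOf)) "in_progress"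
        = todos.any (fun i => pvStatusOf i = "in_progress") := by
      rw [Bool.eq_iff_iff]
      simp [PySem.Set.mem_ofList, List.any_eq_true]
    have hnil : (PySem.Set.ofList (todos.map pvStatusOf)) ≠ [] := by
      cases todos with
      | nil => exact absurd rfl h
      | cons t ts =>
          intro hc
          have hm : pvStatusOf t ∈ PySem.Set.ofList ((t :: ts).map pvStatusOf) := by
            simp [PySem.Set.mem_ofList]
          rw [hc] at hm
          simp at hm
    have hsub : PySem.Set.issubset (PySem.Set.ofList (todos.map pvStatusOf)) ["completed"]
        = todos.all (fun i => pvStatusOf i = "completed") := by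
      rw [Bool.eq_iff_iff]
      simp [PySem.Set.issubset_iff, PySem.Set.mem_ofList]
    simp only [hcont, hnil, hsub, ne_eq, not_false_eq_true, true_and]
    by_cases hin : todos.any (fun i => pvStatusOf i = "in_progress") = true
    · simp [hin]
    · simp only [Bool.not_eq_true] at hin
      simp [hin, h]
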